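-- pv_equiv track=rewrite | github.com/NUSP-SEAP/app-seap_teste | backend/api/services/rds_xlsx_service.py | _choose_value
-- ===== SOURCE A (Python) =====
-- from typing import Any, Dict, List, Optional
--
-- def _is_blank(v: Any) -> bool:
--     if v is None:
--         return True
--     if isinstance(v, str) and v.strip() == "":
--         return True
--     return False
--
-- def _choose_value(entries: List[Dict[str, Any]], field: str) -> Any:
--     """
--     Regra:
--       - Se NÃO houver divergência (<=1 valor não-vazio distinto): pega a primeira entrada (menor ordem) com valor
--       - Se houver divergência: pega a última entrada (maior ordem) que esteja preenchida
--     """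
--     non_empty = [e.get(field) for e in entries if not _is_blank(e.get(field))]
--     uniq: List[Any] = []
--     for v in non_empty:
--         if v not in uniq:
--             uniq.append(v)
--
--     if len(uniq) <= 1:
--         for e in sorted(entries, key=lambda x: int(x.get("ordem") or 0)):
--             v = e.get(field)
--             if not _is_blank(v):
--                 return v
--         return None
--
--     for e in sorted(entries, key=lambda x: int(x.get("ordem") or 0), reverse=True):
--         v = e.get(field)
--         if not _is_blank(v):
--             return v
--     return None
-- ===== SOURCE B (Python) =====
-- def _is_blank(v):
--     if v is None:
--         return True
--     if isinstance(v, str) and v.strip() == "":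
--         return True
--     return False
--
-- def _choose_value(entries, field):
--     # Single linear pass instead of two stable sorts: a set of distinct non-blank
--     # values, plus the first non-blank entry of minimal / maximal "ordem".
--     distinct = set()
--     best_min = None  # (ordem, value) of first non-blank entry with minimal ordem
--     best_max = None  # (ordem, value) of first non-blank entry with maximal ordem
--     for e in entries:
--         v = e.get(field)
--         if _is_blank(v):
--             continue
--         k = int(e.get("ordem") or 0)
--         distinct.add(v)
--         if best_min is None or k < best_min[0]:
--             best_min = (k, v)
--         if best_max is None or k > best_max[0]:
--             best_max = (k, v)
--     if len(distinct) <= 1: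
--         return best_min[1] if best_min is not None else None
--     return best_max[1] if best_max is not None else None
-- ===== Notes on version B (the rewrite author's own statement) =====
-- stated objective: alternative
-- what changed: Replaced A's two stable sorts plus its list-based uniq scan with one linear pass that keeps a set of distinct non-blank values and tracks the first non-blank entry of minimal and of maximal 'ordem'.
import Mathlib
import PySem

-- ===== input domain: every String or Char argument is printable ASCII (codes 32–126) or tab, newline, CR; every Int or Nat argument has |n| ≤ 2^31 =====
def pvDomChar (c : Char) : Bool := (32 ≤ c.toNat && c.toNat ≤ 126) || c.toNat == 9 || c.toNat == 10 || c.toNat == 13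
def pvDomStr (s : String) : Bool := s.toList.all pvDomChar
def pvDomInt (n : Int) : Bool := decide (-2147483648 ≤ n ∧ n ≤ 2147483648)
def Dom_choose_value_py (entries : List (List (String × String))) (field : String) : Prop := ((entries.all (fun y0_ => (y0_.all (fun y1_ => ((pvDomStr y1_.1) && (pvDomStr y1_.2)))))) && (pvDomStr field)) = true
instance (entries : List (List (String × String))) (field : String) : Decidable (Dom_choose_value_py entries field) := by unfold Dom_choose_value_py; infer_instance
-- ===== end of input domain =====

-- B replaces A's two stable sorts and its list-based "uniq" scan by one linear pass that keeps a set of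
-- distinct non-blank values and the first non-blank entry of minimal / maximal "ordem" (alternative algorithm).

-- ===== PORT A =====
-- e.get(k) on the association-list dict (first match; none = missing key)
def pvGet (e : List (String × String)) (k : String) : Option String :=
  PySem.Dict.get? ⟨e⟩ k

-- _is_blank(v) for v = e.get(field) : Option String (none = key missing = Python None)
def pvBlank (v : Option String) : Bool :=
  match v with
  | none => true
  | some s => PySem.Str.strip s == ""

-- int(x.get("ordem") or 0); total stand-in: Pre_ guarantees ofStr? succeeds whenever it is reached
def pvKey (e : List (String × String)) : Int :=
  match pvGet e "ordem" with
  | none => 0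
  | some s => if s == "" then 0 else (PySem.Int.ofStr? s).getD 0

-- 'for e in <sorted list>: v = e.get(field); if not _is_blank(v): return v / return None'
def pvScan (l : List (List (String × String))) (field : String) : Option String :=
  match l with
  | [] => none
  | e :: rest =>
    if pvBlank (pvGet e field) then pvScan rest field
    else pvGet e field

def choose_value_py (entries : List (List (String × String))) (field : String) : Option String :=
  let non_empty := entries.foldl
    (fun acc e => if !pvBlank (pvGet e field) then acc ++ [pvGet e field] else acc) []
  let uniq := non_empty.foldl (fun u v => if u.contains v then u else u ++ [v]) []
  if uniq.length ≤ 1 then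
    pvScan (PySem.List.sorted entries pvKey) field
  else
    pvScan (PySem.List.sorted entries pvKey true) field

-- ===== PORT B =====
-- one loop step: state = (distinct set, best_min, best_max)
def pvStep (field : String)
    (st : PySem.Set String × Option (Int × String) × Option (Int × String))
    (e : List (String × String)) :
    PySem.Set String × Option (Int × String) × Option (Int × String) :=
  match pvGet e field with
  | none => st
  | some v =>
    if PySem.Str.strip v == "" then st
    else
      let k := pvKey e
      ⟨PySem.Set.add st.1 v,
       (match st.2.1 with
        | none => some (k, v)
        | some b => if k < b.1 then some (k, v) else some b),
       (match st.2.2 with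
        | none => some (k, v)
        | some b => if b.1 < k then some (k, v) else some b)⟩

def choose_value_py_alt (entries : List (List (String × String))) (field : String) : Option String :=
  let st := entries.foldl (pvStep field) (PySem.Set.empty, none, none)
  if PySem.Set.len st.1 ≤ 1 then st.2.1.map (·.2)
  else st.2.2.map (·.2)

-- ===== PRECONDITION & SPEC =====
-- Pre_ excludes exactly the inputs where Python A raises ValueError: an entry whose
-- "ordem" value is a non-empty string that int() cannot parse.
def Pre_choose_value_py (entries : List (List (String × String))) (field : String) : Prop :=
  entries.all (fun e =>
    match pvGet e "ordem" with
    | none => true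
    | some s => s == "" || (PySem.Int.ofStr? s).isSome) = true
instance (entries : List (List (String × String))) (field : String) : Decidable (Pre_choose_value_py entries field) := by unfold Pre_choose_value_py; infer_instance

def pvWitness_choose_value_py : (List (List (String × String))) × String :=
  ([[("f", "x"), ("ordem", "1")], [("f", "y"), ("ordem", "2")]], "f")

def Spec_choose_value_py (entries : List (List (String × String))) (field : String) (out : Option String) : Prop := out = choose_value_py_alt entries field
instance (entries : List (List (String × String))) (field : String) (out : Option String) : Decidable (Spec_choose_value_py entries field out) := by unfold Spec_choose_value_py; infer_instance

-- ===== CLAIM (what is proved, stated in full; the proofs are below) =====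
def Claim_equal_choose_value_py : Prop := ∀ (entries : List (List (String × String))) (field : String), Dom_choose_value_py entries field → Pre_choose_value_py entries field → Spec_choose_value_py entries field (choose_value_py entries field)

-- ===== LEMMAS AND PROOFS =====

-- abbreviations used only by the proofs
def pvP (field : String) (e : List (String × String)) : Bool :=
  !pvBlank (pvGet e field)

def pvVal (field : String) (e : List (String × String)) : String :=
  (pvGet e field).getD ""

-- "first minimum" accumulator: the value B's min (resp., via negated key, max) tracking computes
def pvMinAcc (p : List (String × String) → Bool) (key : List (String × String) → Int)
    (acc : Option (List (String × String))) (x : List (String × String)) :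
    Option (List (String × String)) :=
  if p x then
    match acc with
    | none => some x
    | some e => if key x < key e then some x else some e
  else acc

-- pvScan is find?-then-get
theorem pvScan_eq_find (l : List (List (String × String))) (field : String) :
    pvScan l field = (l.find? (pvP field)).bind (fun e => pvGet e field) := by
  induction l with
  | nil => rfl
  | cons e rest ih =>
    simp only [pvScan, List.find?, pvP]
    by_cases h : pvBlank (pvGet e field) <;> simp [h, ih]

-- insertBy preserves key-sortedness
theorem pv_pairwise_insertBy (key : List (String × String) → Int)
    (x : List (String × String)) (ys : List (List (String × String)))
    (h : ys.Pairwise (fun a b => key a ≤ key b)) :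
    (PySem.List.insertBy (fun a b => decide (key a < key b)) x ys).Pairwise
      (fun a b => key a ≤ key b) := by
  induction ys with
  | nil => simp [PySem.List.insertBy]
  | cons y t ih =>
    rcases List.pairwise_cons.1 h with ⟨hy, ht⟩
    by_cases hlt : key x < key y
    · simp only [PySem.List.insertBy, hlt, decide_true, if_true]
      refine List.pairwise_cons.2 ⟨?_, h⟩
      intro z hz
      rcases List.mem_cons.1 hz with rfl | hz
      · omega
      · have := hy z hz; omega
    · simp only [PySem.List.insertBy, hlt, decide_false]
      refine List.pairwise_cons.2 ⟨?_, ih ht⟩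
      intro z hz
      rcases (PySem.List.mem_insertBy _ _ _ _).1 hz with rfl | hz
      · omega
      · exact hy z hz

-- first p-element of a sorted insertion
theorem pv_find_insertBy (p : List (String × String) → Bool)
    (key : List (String × String) → Int)
    (x : List (String × String)) (ys : List (List (String × String)))
    (h : ys.Pairwise (fun a b => key a ≤ key b)) :
    (PySem.List.insertBy (fun a b => decide (key a < key b)) x ys).find? p
      = pvMinAcc p key (ys.find? p) x := by
  induction ys with
  | nil =>
    simp only [PySem.List.insertBy, List.find?, pvMinAcc]
    by_cases hp : p x <;> simp [hp]
  | cons y t ih =>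
    rcases List.pairwise_cons.1 h with ⟨hy, ht⟩
    by_cases hlt : key x < key y
    · simp only [PySem.List.insertBy, hlt, decide_true, if_true]
      by_cases hp : p x
      · cases hfind : (y :: t).find? p with
        | none => simp [List.find?, pvMinAcc, hp]
        | some e =>
          have he := List.mem_of_find?_eq_some hfind
          have hyle : key y ≤ key e := by
            rcases List.mem_cons.1 he with rfl | hmem
            · exact le_rfl
            · exact hy e hmem
          simp [List.find?, pvMinAcc, hp, show key x < key e by omega]
      · simp [List.find?, pvMinAcc, hp]
    · simp only [PySem.List.insertBy, hlt, decide_false, Bool.false_eq_true, if_false]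
      by_cases hpy : p y
      · by_cases hp : p x <;> simp [List.find?, pvMinAcc, hpy, hp, hlt]
      · simp only [List.find?, hpy]
        exact ih ht

-- find? over the whole insertion-sort fold = B's first-min fold
theorem pv_find_sortfold (p : List (String × String) → Bool)
    (key : List (String × String) → Int)
    (xs acc : List (List (String × String)))
    (h : acc.Pairwise (fun a b => key a ≤ key b)) :
    (xs.foldl (fun acc x => PySem.List.insertBy (fun a b => decide (key a < key b)) x acc) acc).find? p
      = xs.foldl (pvMinAcc p key) (acc.find? p) := by
  induction xs generalizing acc with
  | nil => rfl
  | cons x xs ih =>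
    simp only [List.foldl_cons]
    rw [ih _ (pv_pairwise_insertBy key x acc h), pv_find_insertBy p key x acc h]

theorem pv_find_sorted (p : List (String × String) → Bool)
    (key : List (String × String) → Int) (xs : List (List (String × String))) :
    (PySem.List.sorted xs key).find? p = xs.foldl (pvMinAcc p key) none := by
  rw [PySem.List.sorted_eq_foldl_insertBy, pv_find_sortfold p key xs [] (by simp)]
  rfl

theorem pv_find_sorted_rev (p : List (String × String) → Bool)
    (key : List (String × String) → Int) (xs : List (List (String × String))) :
    (PySem.List.sorted xs key true).find? p = xs.foldl (pvMinAcc p (fun e => -key e)) none := by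
  rw [PySem.List.sorted_rev_eq_foldl_insertBy]
  have hfun : (fun (a b : List (String × String)) => decide (key b < key a))
      = (fun a b => decide ((fun e => -key e) a < (fun e => -key e) b)) := by
    funext a b; simp only [decide_eq_decide]; omega
  rw [hfun]
  simpa using pv_find_sortfold p (fun e => -key e) xs [] (by simp)

-- the chosen entry satisfies p
theorem pv_minfold_sat (p : List (String × String) → Bool)
    (key : List (String × String) → Int) (xs : List (List (String × String)))
    (acc : Option (List (String × String))) (hacc : ∀ e, acc = some e → p e)
    (e : List (String × String)) (h : xs.foldl (pvMinAcc p key) acc = some e) : p e := by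
  induction xs generalizing acc with
  | nil => exact hacc e h
  | cons x xs ih =>
    refine ih _ ?_ h
    intro e' he'
    simp only [pvMinAcc] at he'
    by_cases hp : p x
    · simp only [hp, if_true] at he'
      cases hac : acc with
      | none => simp [hac] at he'; exact he' ▸ hp
      | some b =>
        simp only [hac] at he'
        by_cases hlt : key x < key b
        · simp [hlt] at he'; exact he' ▸ hp
        · simp [hlt] at he'; exact he' ▸ hacc b hac
    · simp only [hp] at he'
      exact hacc e' he'

-- B's triple fold, componentwise
theorem pv_triple_fold (field : String) (xs : List (List (String × String)))
    (s : PySem.Set String) (m M : Option (Int × String)) :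
    xs.foldl (pvStep field) (s, m, M)
      = (xs.foldl (fun s e => if pvP field e then PySem.Set.add s (pvVal field e) else s) s,
         xs.foldl (fun m e => if pvP field e then
             (match m with
              | none => some (pvKey e, pvVal field e)
              | some b => if pvKey e < b.1 then some (pvKey e, pvVal field e) else some b)
           else m) m,
         xs.foldl (fun M e => if pvP field e then
             (match M with
              | none => some (pvKey e, pvVal field e)
              | some b => if b.1 < pvKey e then some (pvKey e, pvVal field e) else some b)
           else M) M) := by
  induction xs generalizing s m M with
  | nil => rfl
  | cons e xs ih =>
    simp only [List.foldl_cons]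
    rw [ih]
    congr 1 <;> [skip; congr 1] <;>
    · simp only [pvStep, pvP, pvVal, pvBlank]
      cases hv : pvGet e field with
      | none => simp
      | some v => by_cases hb : PySem.Str.strip v == "" <;> simp [hb]

-- pair-tracking min fold = entry-tracking min fold, projected
theorem pv_pair_min (field : String) (key : List (String × String) → Int)
    (xs : List (List (String × String))) (m : Option (List (String × String))) :
    xs.foldl (fun m e => if pvP field e then
        (match m with
         | none => some (key e, pvVal field e)
         | some b => if key e < b.1 then some (key e, pvVal field e) else some b)
      else m) (m.map (fun e => (key e, pvVal field e)))
    = (xs.foldl (pvMinAcc (pvP field) key) m).map (fun e => (key e, pvVal field e)) := by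
  induction xs generalizing m with
  | nil => rfl
  | cons x xs ih =>
    simp only [List.foldl_cons]
    rw [← ih]
    congr 1
    simp only [pvMinAcc]
    by_cases hp : pvP field x
    · simp only [hp, if_true]
      cases m with
      | none => rfl
      | some b =>
        simp only [Option.map_some]
        by_cases hlt : key x < key b <;> simp [hlt]
    · simp [hp]

-- pair-tracking max fold = entry-tracking min fold for the negated key, projected
theorem pv_pair_max (field : String) (xs : List (List (String × String)))
    (m : Option (List (String × String))) :
    xs.foldl (fun M e => if pvP field e then
        (match M with
         | none => some (pvKey e, pvVal field e)
         | some b => if b.1 < pvKey e then some (pvKey e, pvVal field e) else some b)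
      else M) (m.map (fun e => (pvKey e, pvVal field e)))
    = (xs.foldl (pvMinAcc (pvP field) (fun e => -pvKey e)) m).map (fun e => (pvKey e, pvVal field e)) := by
  induction xs generalizing m with
  | nil => rfl
  | cons x xs ih =>
    simp only [List.foldl_cons]
    rw [← ih]
    congr 1
    simp only [pvMinAcc]
    by_cases hp : pvP field x
    · simp only [hp, if_true]
      cases m with
      | none => rfl
      | some b =>
        simp only [Option.map_some]
        by_cases hlt : pvKey b < pvKey x
        · simp [hlt, show -pvKey x < -pvKey b by omega]
        · simp [hlt, show ¬ -pvKey x < -pvKey b by omega]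
    · simp [hp]

-- string-set fold = Set.ofList of the non-blank values
theorem pv_set_fold (field : String) (xs : List (List (String × String))) (s : PySem.Set String) :
    xs.foldl (fun s e => if pvP field e then PySem.Set.add s (pvVal field e) else s) s
      = ((xs.filter (pvP field)).map (pvVal field)).foldl PySem.Set.add s := by
  induction xs generalizing s with
  | nil => rfl
  | cons x xs ih =>
    by_cases hp : pvP field x <;> simp [hp, ih]

-- folding Set.add over (xs.map some) is the String-set fold, mapped through some
theorem pv_ofList_map_some (xs : List String) (s : PySem.Set String) :
    (xs.map some).foldl (fun u v => PySem.Set.add u v) (s.map some)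
      = (xs.foldl (fun u v => PySem.Set.add u v) s).map some := by
  induction xs generalizing s with
  | nil => rfl
  | cons x xs ih =>
    simp only [List.map_cons, List.foldl_cons]
    rw [← ih]
    congr 1
    by_cases hm : x ∈ s <;> simp [PySem.Set.add, PySem.Set.contains, hm]

-- when p e holds, get? returns some (val e)
theorem pv_get_of_p (field : String) (e : List (String × String)) (h : pvP field e) :
    pvGet e field = some (pvVal field e) := by
  simp only [pvP, pvBlank] at h
  cases hv : pvGet e field with
  | none => simp [hv] at h
  | some v => simp [pvVal, hv]

-- ===== VERDICT (by name: the statement is the Claim_ definition above) =====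
theorem choose_value_py_spec : Claim_equal_choose_value_py := by
  intro entries field _ _
  unfold Spec_choose_value_py choose_value_py choose_value_py_alt
  rw [pv_triple_fold]
  dsimp only
  have hNE : entries.foldl
      (fun acc e => if !pvBlank (pvGet e field) then acc ++ [pvGet e field] else acc) []
      = ((entries.filter (pvP field)).map (pvVal field)).map some := by
    rw [PySem.List.foldl_append_if (fun e => !pvBlank (pvGet e field)) (fun e => pvGet e field) entries []]
    simp only [List.nil_append, List.map_map]
    apply List.map_congr_left
    intro e he
    exact pv_get_of_p field e (List.mem_filter.1 he).2
  have huniq : ∀ (l : List (Option String)),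
      l.foldl (fun u v => if u.contains v then u else u ++ [v]) ([] : List (Option String))
      = l.foldl (fun u v => PySem.Set.add u v) [] := by
    intro l; rfl
  have h2 := pv_ofList_map_some ((entries.filter (pvP field)).map (pvVal field)) []
  simp only [List.map_nil] at h2
  have hlen : (entries.foldl
      (fun acc e => if !pvBlank (pvGet e field) then acc ++ [pvGet e field] else acc) []
      |>.foldl (fun u v => if u.contains v then u else u ++ [v]) []).length
      = (entries.foldl (fun s e => if pvP field e then PySem.Set.add s (pvVal field e) else s)
          (PySem.Set.empty : PySem.Set String)).length := by
    rw [hNE, huniq, pv_set_fold field entries PySem.Set.empty, h2, List.length_map]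
    rfl
  have hasc : pvScan (PySem.List.sorted entries pvKey) field
      = (entries.foldl (pvMinAcc (pvP field) pvKey) none).map (fun e => pvVal field e) := by
    rw [pvScan_eq_find, pv_find_sorted]
    cases hf : entries.foldl (pvMinAcc (pvP field) pvKey) none with
    | none => rfl
    | some e =>
      have hp := pv_minfold_sat (pvP field) pvKey entries none (by simp) e hf
      simp [pv_get_of_p field e hp]
  have hdesc : pvScan (PySem.List.sorted entries pvKey true) field
      = (entries.foldl (pvMinAcc (pvP field) (fun e => -pvKey e)) none).map (fun e => pvVal field e) := by
    rw [pvScan_eq_find, pv_find_sorted_rev]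
    cases hf : entries.foldl (pvMinAcc (pvP field) (fun e => -pvKey e)) none with
    | none => rfl
    | some e =>
      have hp := pv_minfold_sat (pvP field) (fun e => -pvKey e) entries none (by simp) e hf
      simp [pv_get_of_p field e hp]
  have hmin := pv_pair_min field pvKey entries none
  have hmax := pv_pair_max field entries none
  simp only [Option.map_none] at hmin hmax
  by_cases hc : (entries.foldl (fun s e => if pvP field e then PySem.Set.add s (pvVal field e) else s)
      (PySem.Set.empty : PySem.Set String)).length ≤ 1
  · rw [if_pos (by rw [hlen]; omega), if_pos (by simp only [PySem.Set.len]; exact_mod_cast hc)]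
    rw [hasc, hmin]
    simp [Option.map_map, Function.comp_def]
  · rw [if_neg (by rw [hlen]; omega), if_neg (by simp only [PySem.Set.len]; exact_mod_cast hc)]
    rw [hdesc, hmax]
    simp [Option.map_map, Function.comp_def]
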